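-- pv_equiv track=rewrite | github.com/npit/nlp-semantic-augmentation | dataset/manual_reader.py | handle_instance_labels
-- ===== SOURCE A (Python) =====
-- import numbers
--
-- def handle_instance_labels(raw_lbls, current_label_names):
--     """Ensure iterable of numeric labels"""
--     # iterable check
--     try:
--         raw_lbls[0]
--     except IndexError:
--         raw_lbls = []
--     except TypeError:
--         raw_lbls = [raw_lbls]
--
--     output_lbls = []
--     for i in range(len(raw_lbls)):
--         l = raw_lbls[i]
--         # numeric check
--         if not isinstance(l, numbers.Number):
--             if l not in current_label_names:
--                 current_label_names.append(l)
--             # get numeric index of name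
--             output_lbls.append(current_label_names.index(l))
--         else:
--             # numeric, just append
--             output_lbls.append(l)
--     return output_lbls
-- ===== SOURCE B (Python) =====
-- import numbers
--
-- def handle_instance_labels(raw_lbls, current_label_names):
--     """Ensure iterable of numeric labels (split-table re-implementation).
--
--     Instead of registering names and searching the growing table inside one
--     fused loop, the pre-existing names are frozen as `base` and the genuinely
--     new names are collected once; every index is then computed arithmetically
--     as position-in-base or len(base) + rank-among-new, so the combined table
--     is never searched while it grows.  Same observable mutation as the
--     original: new names are appended to current_label_names.
--     """
--     try:
--         raw_lbls[0]
--     except IndexError: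
--         raw_lbls = []
--     except TypeError:
--         raw_lbls = [raw_lbls]
--
--     base = list(current_label_names)
--     nbase = len(base)
--     # first-appearance list of the genuinely new names
--     fresh = []
--     for l in raw_lbls:
--         if not isinstance(l, numbers.Number) and l not in base and l not in fresh:
--             fresh.append(l)
--     current_label_names.extend(fresh)
--     return [l if isinstance(l, numbers.Number)
--             else (base.index(l) if l in base else nbase + fresh.index(l))
--             for l in raw_lbls]
-- ===== Notes on version B (the rewrite author's own statement) =====
-- stated objective: alternative
-- what changed: A's fused loop registers each name into the growing table and re-searches that mutated table with list.index; B freezes the pre-existing names as an immutable base, collects the genuinely new names in one dedup pass, extends current_label_names once, and computes every index arithmetically as position-in-base or len(base)+rank-among-new, never searching the combined growing table.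
import Mathlib
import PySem

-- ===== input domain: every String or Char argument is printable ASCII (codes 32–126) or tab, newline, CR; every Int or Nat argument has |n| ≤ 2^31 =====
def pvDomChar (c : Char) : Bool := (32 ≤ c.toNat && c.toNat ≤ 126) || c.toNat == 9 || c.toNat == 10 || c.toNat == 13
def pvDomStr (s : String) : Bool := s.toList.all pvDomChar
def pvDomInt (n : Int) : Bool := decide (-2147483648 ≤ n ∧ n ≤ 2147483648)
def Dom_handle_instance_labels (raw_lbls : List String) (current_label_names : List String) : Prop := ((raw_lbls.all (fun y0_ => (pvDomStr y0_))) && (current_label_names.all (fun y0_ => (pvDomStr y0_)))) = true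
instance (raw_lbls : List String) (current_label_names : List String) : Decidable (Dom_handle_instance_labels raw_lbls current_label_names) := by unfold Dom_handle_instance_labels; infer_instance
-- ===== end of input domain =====

-- B replaces A's fused register-and-search loop with a frozen base table, one dedup pass
-- collecting the new names, and an arithmetic index formula (objective: alternative).
-- Both Pythons append new names to current_label_names in place; the equivalence proved
-- is about the RETURN value.

-- ===== PORT A =====
-- A's fused loop: for each label, register it if new, then emit its index in the
-- (possibly just extended) name list. On List String inputs the TypeError branch of the
-- try/except and the numbers.Number branch are unreachable (strings are never Numbers).
def handle_instance_labels (raw_lbls : List String) (current_label_names : List String) : List Int :=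
  -- try raw_lbls[0] except IndexError: raw_lbls = []
  let raw := match PySem.List.pyGet? raw_lbls 0 with
    | none => ([] : List String)
    | some _ => raw_lbls
  ((PySem.List.pyRange 0 (raw.length : Int) 1).foldl
    (fun (st : List String × List Int) i =>
      let l := PySem.List.pyGetD raw i ""   -- raw_lbls[i]; i is always in range here, exact
      -- if l not in current_label_names: append; then index in the current list
      let names := if l ∈ st.1 then st.1 else st.1 ++ [l]
      (names, st.2 ++ [(((PySem.List.index? names l).getD 0 : Nat) : Int)]))
    (current_label_names, [])).2

-- ===== PORT B =====
-- Source B's dedup loop body: append l to fresh iff it is neither a pre-existing name nor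
-- already collected
def hilFreshStep (base : List String) (fresh : List String) (l : String) : List String :=
  if l ∉ base ∧ l ∉ fresh then fresh ++ [l] else fresh

def handle_instance_labels_alt (raw_lbls : List String) (current_label_names : List String) : List Int :=
  -- the try/except normalization: raw_lbls[0] only raises IndexError on [], leaving []
  let raw := match PySem.List.pyGet? raw_lbls 0 with
    | none => ([] : List String)
    | some _ => raw_lbls
  let base := current_label_names          -- base = list(current_label_names), a frozen copy
  let nbase : Int := base.length
  let fresh := raw.foldl (hilFreshStep base) []   -- first-appearance list of the new names
  -- arithmetic index formula: position in base, or nbase + rank among the new names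
  raw.map (fun l =>
    if l ∈ base then (((PySem.List.index? base l).getD 0 : Nat) : Int)
    else nbase + (((PySem.List.index? fresh l).getD 0 : Nat) : Int))

-- ===== PRECONDITION & SPEC =====
def Spec_handle_instance_labels (raw_lbls : List String) (current_label_names : List String) (out : List Int) : Prop := out = handle_instance_labels_alt raw_lbls current_label_names
instance (raw_lbls : List String) (current_label_names : List String) (out : List Int) : Decidable (Spec_handle_instance_labels raw_lbls current_label_names out) := by unfold Spec_handle_instance_labels; infer_instance

-- ===== CLAIM (what is proved, stated in full; the proofs are below) =====
def Claim_equal_handle_instance_labels : Prop := ∀ (raw_lbls : List String) (current_label_names : List String), Dom_handle_instance_labels raw_lbls current_label_names → Spec_handle_instance_labels raw_lbls current_label_names (handle_instance_labels raw_lbls current_label_names)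

-- ===== LEMMAS AND PROOFS =====

-- the try/except normalization is the identity on lists
theorem hil_norm (raw : List String) :
    (match PySem.List.pyGet? raw 0 with
      | none => ([] : List String)
      | some _ => raw) = raw := by
  cases raw <;> simp [PySem.List.pyGet?, PySem.List.pyIdx?]

-- index? shifts by the length of a prefix that misses the element
theorem hil_index?_append_not_mem {a : List String} {x : String} (b : List String)
    (h : x ∉ a) :
    PySem.List.index? (a ++ b) x = (PySem.List.index? b x).map (· + a.length) := by
  induction a with
  | nil =>
    cases hb : PySem.List.index? b x
    · simp only [List.nil_append, hb, Option.map_none]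
    · simp only [List.nil_append, hb, Option.map_some, List.length_nil, Nat.add_zero]
  | cons y t ih =>
    have hxy : y ≠ x := fun he => h (by simp [he])
    have hxt : x ∉ t := fun he => h (by simp [he])
    rw [List.cons_append, PySem.List.index?_cons_of_ne _ hxy, ih hxt]
    cases PySem.List.index? b x <;> simp <;> omega

-- the dedup fold only appends
theorem hilFreshStep_extends (base raw : List String) :
    ∀ F : List String, ∃ ext, raw.foldl (hilFreshStep base) F = F ++ ext := by
  induction raw with
  | nil => intro F; exact ⟨[], by simp⟩
  | cons l rest ih =>
    intro F
    simp only [List.foldl_cons, hilFreshStep]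
    by_cases hc : l ∉ base ∧ l ∉ F
    · obtain ⟨ext, he⟩ := ih (F ++ [l])
      exact ⟨l :: ext, by simpa [hc] using he⟩
    · obtain ⟨ext, he⟩ := ih F
      exact ⟨ext, by simpa [hc] using he⟩

-- A's loop body, named
def hilAStep (st : List String × List Int) (l : String) : List String × List Int :=
  (if l ∈ st.1 then st.1 else st.1 ++ [l],
   st.2 ++ [(((PySem.List.index? (if l ∈ st.1 then st.1 else st.1 ++ [l]) l).getD 0 : Nat) : Int)])

-- main invariant: A's fused loop over base ++ F equals B's dedup fold plus the
-- arithmetic index formula taken over the FINAL fresh list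
theorem hil_main (raw : List String) :
    ∀ (base F : List String) (out : List Int), (∀ x ∈ F, x ∉ base) →
      raw.foldl hilAStep (base ++ F, out)
        = (base ++ raw.foldl (hilFreshStep base) F,
           out ++ raw.map (fun l =>
             if l ∈ base then (((PySem.List.index? base l).getD 0 : Nat) : Int)
             else (base.length : Int) +
               (((PySem.List.index? (raw.foldl (hilFreshStep base) F) l).getD 0 : Nat) : Int))) := by
  induction raw with
  | nil => intro base F out _; simp
  | cons l rest ih =>
    intro base F out hF
    rw [List.foldl_cons, List.foldl_cons]
    by_cases hb : l ∈ base
    · -- pre-existing name: A's table is unchanged, B's formula uses base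
      have hmem : l ∈ base ++ F := by simp [hb]
      have hstep : hilAStep (base ++ F, out) l
          = (base ++ F, out ++ [(((PySem.List.index? base l).getD 0 : Nat) : Int)]) := by
        simp only [hilAStep, if_pos hmem, PySem.List.index?_append_of_mem F hb]
      have hfs : hilFreshStep base F l = F := by simp [hilFreshStep, hb]
      rw [hstep, hfs, ih base F _ hF]
      simp [hb]
    · by_cases hf : l ∈ F
      · -- already-collected new name: table unchanged; index = base.length + rank
        have hmem : l ∈ base ++ F := by simp [hf]
        obtain ⟨k, hk⟩ := Option.isSome_iff_exists.mp
          ((PySem.List.index?_isSome_iff F l).mpr hf)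
        have hstep : hilAStep (base ++ F, out) l
            = (base ++ F, out ++ [((k + base.length : Nat) : Int)]) := by
          simp only [hilAStep, if_pos hmem, hil_index?_append_not_mem F hb, hk]
          rfl
        have hfs : hilFreshStep base F l = F := by simp [hilFreshStep, hf]
        rw [hstep, hfs, ih base F _ hF]
        obtain ⟨ext, hext⟩ := hilFreshStep_extends base rest F
        have hfin : PySem.List.index? (rest.foldl (hilFreshStep base) F) l = some k := by
          rw [hext, PySem.List.index?_append_of_mem _ hf, hk]
        have hc : ((k + base.length : Nat) : Int) = (base.length : Int) + (k : Nat) := by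
          push_cast; ring
        simp only [List.map_cons, if_neg hb, hfin, List.append_assoc, List.singleton_append,
          Option.getD_some, hc]
      · -- genuinely new name: A appends it; its index is base.length + F.length
        have hmem : l ∉ base ++ F := by simp [hb, hf]
        have hstep : hilAStep (base ++ F, out) l
            = (base ++ (F ++ [l]), out ++ [((F.length + base.length : Nat) : Int)]) := by
          simp only [hilAStep, if_neg hmem]
          rw [List.append_assoc, hil_index?_append_not_mem (F ++ [l]) hb,
            PySem.List.index?_append_singleton_self F l hf]
          rfl
        have hfs : hilFreshStep base F l = F ++ [l] := by simp [hilFreshStep, hb, hf]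
        have hF' : ∀ x ∈ F ++ [l], x ∉ base := by
          intro x hx
          rcases List.mem_append.mp hx with h1 | h1
          · exact hF x h1
          · simpa [List.mem_singleton.mp h1] using hb
        rw [hstep, hfs, ih base (F ++ [l]) _ hF']
        obtain ⟨ext, hext⟩ := hilFreshStep_extends base rest (F ++ [l])
        have hlm : l ∈ F ++ [l] := by simp
        have hfin : PySem.List.index? (rest.foldl (hilFreshStep base) (F ++ [l])) l
            = some F.length := by
          rw [hext, PySem.List.index?_append_of_mem _ hlm,
            PySem.List.index?_append_singleton_self F l hf]
        have hc : ((F.length + base.length : Nat) : Int)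
            = (base.length : Int) + (F.length : Nat) := by push_cast; ring
        simp only [List.map_cons, if_neg hb, hfin, List.append_assoc, List.singleton_append,
          Option.getD_some, hc]

-- ===== VERDICT (by name: the statement is the Claim_ definition above) =====
theorem handle_instance_labels_spec : Claim_equal_handle_instance_labels := by
  intro raw cur _
  unfold Spec_handle_instance_labels handle_instance_labels handle_instance_labels_alt
  rw [hil_norm]
  dsimp only
  show (List.foldl (fun (st : List String × List Int) i => hilAStep st (PySem.List.pyGetD raw i ""))
          (cur, []) (PySem.List.pyRange 0 (raw.length : Int) 1)).2
      = raw.map (fun l =>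
          if l ∈ cur then (((PySem.List.index? cur l).getD 0 : Nat) : Int)
          else (cur.length : Int) +
            (((PySem.List.index? (raw.foldl (hilFreshStep cur) []) l).getD 0 : Nat) : Int))
  rw [PySem.List.foldl_pyRange_zero_pyGetD' raw "" hilAStep (cur, [])]
  have h := hil_main raw cur [] [] (by simp)
  simp only [List.append_nil, List.nil_append] at h
  rw [h]
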